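-- pv_equiv track=rewrite | github.com/prateekdesh/linux-driver-analyzer | metrics-and-scoring/parse-and-score.py | parse_and_score_cppcheck_results
-- ===== SOURCE A (Python) =====
-- def parse_and_score_cppcheck_results(cppcheck_results):
--     severity_weights = {
--         'error': 10,
--         'warning': 5,
--         'style': 2,
--         'performance': 3,
--         'portability': 2,
--         'information': 1
--     }
--
--     total_penalty = 0
--
--     if not cppcheck_results or 'errors' not in cppcheck_results:
--         return 100
--
--     for error in cppcheck_results['errors']:
--         severity = error.get('severity', 'unknown')
--
--         if error.get('id') in ['checkersReport', 'missingIncludeSystem']: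
--             continue
--
--         weight = severity_weights.get(severity, 1)
--         total_penalty += weight
--
--     quality_score = max(0, 100 - total_penalty)
--     return quality_score
-- ===== SOURCE B (Python) =====
-- def parse_and_score_cppcheck_results(cppcheck_results):
--     severity_weights = {
--         'error': 10,
--         'warning': 5,
--         'style': 2,
--         'performance': 3,
--         'portability': 2,
--         'information': 1
--     }
--     if not cppcheck_results or 'errors' not in cppcheck_results:
--         return 100
--     severities = [e.get('severity', 'unknown')
--                   for e in cppcheck_results['errors']
--                   if e.get('id') not in ('checkersReport', 'missingIncludeSystem')]
--     # every kept error costs at least 1 (the unknown-severity weight);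
--     # each known severity adds its surplus (w - 1) per occurrence
--     penalty = len(severities)
--     for sev, w in severity_weights.items():
--         penalty += (w - 1) * severities.count(sev)
--     return max(0, 100 - penalty)
-- ===== Notes on version B (the rewrite author's own statement) =====
-- stated objective: alternative
-- what changed: Inverts the iteration: instead of accumulating a looked-up weight per error, B charges a baseline of 1 per kept error (len) and then loops over the fixed weight table, adding each severity's surplus (w-1)*count of that severity, so no per-error weight lookup or default handling occurs.
import Mathlib
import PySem

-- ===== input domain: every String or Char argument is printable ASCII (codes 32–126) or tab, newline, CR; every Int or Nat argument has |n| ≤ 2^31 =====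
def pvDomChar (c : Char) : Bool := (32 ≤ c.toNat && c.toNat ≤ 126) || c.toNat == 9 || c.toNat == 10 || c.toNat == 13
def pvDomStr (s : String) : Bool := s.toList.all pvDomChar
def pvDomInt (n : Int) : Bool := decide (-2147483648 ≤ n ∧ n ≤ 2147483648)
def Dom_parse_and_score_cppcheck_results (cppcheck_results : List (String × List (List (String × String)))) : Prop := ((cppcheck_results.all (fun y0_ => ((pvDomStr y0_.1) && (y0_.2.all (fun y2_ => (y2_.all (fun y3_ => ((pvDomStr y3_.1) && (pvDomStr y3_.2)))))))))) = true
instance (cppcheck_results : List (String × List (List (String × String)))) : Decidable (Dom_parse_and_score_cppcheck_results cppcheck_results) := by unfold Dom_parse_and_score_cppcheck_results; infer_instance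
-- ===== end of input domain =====

-- B inverts the iteration: a baseline penalty of 1 per kept error plus, per entry of the
-- fixed weight table, that severity's surplus (w-1)*count (objective: alternative; same cost).

-- ===== PORT A =====
def pvWeights : PySem.Dict String Int :=
  PySem.Dict.ofList [("error", 10), ("warning", 5), ("style", 2),
                     ("performance", 3), ("portability", 2), ("information", 1)]

def parse_and_score_cppcheck_results (cppcheck_results : List (String × List (List (String × String)))) : Int :=
  let severity_weights := pvWeights
  let d := PySem.Dict.mk cppcheck_results
  if cppcheck_results = [] ∨ d.contains "errors" = false then 100
  else
    let total_penalty :=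
      (d.getD "errors" []).foldl (fun acc error =>
        let ed := PySem.Dict.mk error
        let severity := ed.getD "severity" "unknown"
        if ed.get? "id" = some "checkersReport" ∨ ed.get? "id" = some "missingIncludeSystem" then
          acc
        else
          acc + severity_weights.getD severity 1) 0
    max 0 (100 - total_penalty)

-- ===== PORT B =====
def parse_and_score_cppcheck_results_alt (cppcheck_results : List (String × List (List (String × String)))) : Int :=
  let severity_weights := pvWeights
  let d := PySem.Dict.mk cppcheck_results
  if cppcheck_results = [] ∨ d.contains "errors" = false then 100
  else
    let severities := ((d.getD "errors" []).filter (fun error =>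
        ¬ ((PySem.Dict.mk error).get? "id" = some "checkersReport" ∨
           (PySem.Dict.mk error).get? "id" = some "missingIncludeSystem"))).map
      (fun error => (PySem.Dict.mk error).getD "severity" "unknown")
    let penalty := severity_weights.items.foldl
      (fun acc p => acc + (p.2 - 1) * (severities.count p.1 : Int))
      (severities.length : Int)
    max 0 (100 - penalty)

-- ===== PRECONDITION & SPEC =====
def Spec_parse_and_score_cppcheck_results (cppcheck_results : List (String × List (List (String × String)))) (out : Int) : Prop := out = parse_and_score_cppcheck_results_alt cppcheck_results
instance (cppcheck_results : List (String × List (List (String × String)))) (out : Int) : Decidable (Spec_parse_and_score_cppcheck_results cppcheck_results out) := by unfold Spec_parse_and_score_cppcheck_results; infer_instance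

-- ===== CLAIM =====
def Claim_equal_parse_and_score_cppcheck_results : Prop := ∀ (cppcheck_results : List (String × List (List (String × String)))), Dom_parse_and_score_cppcheck_results cppcheck_results → Spec_parse_and_score_cppcheck_results cppcheck_results (parse_and_score_cppcheck_results cppcheck_results)

-- ===== LEMMAS AND PROOFS =====

-- the looked-up weight of any severity is 1 plus its surplus read off the table
theorem pv_getD_eq_one_add_surplus (x : String) :
    pvWeights.getD x 1
      = 1 + (pvWeights.items.map (fun p => if p.1 = x then p.2 - 1 else 0)).sum := by
  by_cases h1 : x = "error"
  · subst h1; decide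
  by_cases h2 : x = "warning"
  · subst h2; decide
  by_cases h3 : x = "style"
  · subst h3; decide
  by_cases h4 : x = "performance"
  · subst h4; decide
  by_cases h5 : x = "portability"
  · subst h5; decide
  by_cases h6 : x = "information"
  · subst h6; decide
  have hc : pvWeights.contains x = false := by
    rw [PySem.Dict.contains_eq_decide_mem_keys]
    simp only [show pvWeights.keys = ["error", "warning", "style", "performance",
      "portability", "information"] from rfl, List.mem_cons, List.not_mem_nil,
      or_false, decide_eq_false_iff_not]
    push Not
    exact ⟨h1, h2, h3, h4, h5, h6⟩
  rw [PySem.Dict.getD_of_not_contains _ 1 hc]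
  simp only [show pvWeights.items = [("error", 10), ("warning", 5), ("style", 2),
    ("performance", 3), ("portability", 2), ("information", 1)] from rfl,
    List.map, List.sum_cons, List.sum_nil]
  rw [if_neg fun h => h1 h.symm, if_neg fun h => h2 h.symm, if_neg fun h => h3 h.symm,
      if_neg fun h => h4 h.symm, if_neg fun h => h5 h.symm, if_neg fun h => h6 h.symm]
  norm_num

-- per-element weight sum = length + table-driven surplus-times-count sum
theorem pv_sum_weights_eq (xs : List String) :
    (xs.map (fun s => pvWeights.getD s 1)).sum
      = (xs.length : Int)
        + (pvWeights.items.map (fun p => (p.2 - 1) * (xs.count p.1 : Int))).sum := by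
  induction xs with
  | nil => decide
  | cons x t ih =>
    have hcount : pvWeights.items.map (fun p => (p.2 - 1) * (((x :: t).count p.1 : Nat) : Int))
        = pvWeights.items.map (fun p =>
            (p.2 - 1) * ((t.count p.1 : Nat) : Int) + (if p.1 = x then p.2 - 1 else 0)) := by
      apply List.map_congr_left
      intro p _
      by_cases hpx : p.1 = x
      · simp [hpx, List.count_cons_self]; ring
      · have hxp : ¬ x = p.1 := fun h => hpx h.symm
        have hcnt : (x :: t).count p.1 = t.count p.1 := by
          rw [List.count_cons]; simp [hxp]
        simp [hcnt, hpx]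
    simp only [List.map, List.sum_cons, ih, List.length_cons, hcount, List.sum_map_add,
      pv_getD_eq_one_add_surplus x]
    push_cast
    ring

-- ===== VERDICT =====
theorem parse_and_score_cppcheck_results_spec : Claim_equal_parse_and_score_cppcheck_results := by
  intro cr _
  unfold Spec_parse_and_score_cppcheck_results
  unfold parse_and_score_cppcheck_results parse_and_score_cppcheck_results_alt
  simp only []
  split
  · rfl
  · congr 1
    congr 1
    set errs := (PySem.Dict.mk cr).getD "errors" [] with herrs
    rw [show (fun acc (error : List (String × String)) =>
          let ed := PySem.Dict.mk error
          let severity := ed.getD "severity" "unknown"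
          if ed.get? "id" = some "checkersReport" ∨ ed.get? "id" = some "missingIncludeSystem" then
            acc
          else
            acc + pvWeights.getD severity 1)
        = (fun acc (error : List (String × String)) =>
          if ¬ ((PySem.Dict.mk error).get? "id" = some "checkersReport" ∨
                (PySem.Dict.mk error).get? "id" = some "missingIncludeSystem") then
            acc + pvWeights.getD ((PySem.Dict.mk error).getD "severity" "unknown") 1
          else acc)
        from by funext acc e; by_cases h : (PySem.Dict.mk e).get? "id" = some "checkersReport" ∨ (PySem.Dict.mk e).get? "id" = some "missingIncludeSystem" <;> simp [h]]
    rw [PySem.List.foldl_ite_eq_foldl_filter]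
    rw [PySem.List.foldl_add, PySem.List.foldl_add]
    rw [← pv_sum_weights_eq, List.map_map, zero_add]
    rfl
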